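-- pv_equiv track=rewrite | github.com/MrAliTheGreat/DataStructure | Assignment 3/3.py | find_correct_format
-- ===== SOURCE A (Python) =====
-- def combine_and_get_answer(first_stack , second_stack , top_fisrt_stack , top_second_stack):
-- 	answer = ""
-- 	while(top_fisrt_stack != 0):
-- 		second_stack.append(first_stack.pop())
-- 		top_second_stack += 1
-- 		top_fisrt_stack -= 1
--
-- 	while(top_second_stack != 0):
-- 		answer += second_stack.pop()
-- 		top_second_stack -= 1
--
-- 	return answer
--
-- def find_correct_format(word):
-- 	# Initilizing the stacks
-- 	first_stack = []
-- 	top_fisrt_stack = 0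
-- 	second_stack = []
-- 	top_second_stack = 0
--
-- 	for i in range(len(word)):
-- 		if(word[i] == "L"):
-- 			if(top_fisrt_stack != 0):
-- 				second_stack.append(first_stack.pop())
-- 				top_second_stack += 1
-- 				top_fisrt_stack -= 1
-- 		elif(word[i] == "R"):
-- 			if(top_second_stack != 0):
-- 				first_stack.append(second_stack.pop())
-- 				top_fisrt_stack += 1
-- 				top_second_stack -= 1
-- 		else:
-- 			first_stack.append(word[i])
-- 			top_fisrt_stack += 1
--
-- 	return combine_and_get_answer(first_stack , second_stack , top_fisrt_stack , top_second_stack)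
-- ===== SOURCE B (Python) =====
-- def find_correct_format(word):
--     buf = []
--     pos = 0
--     for ch in word:
--         if ch == "L":
--             pos = max(pos - 1, 0)
--         elif ch == "R":
--             pos = min(pos + 1, len(buf))
--         else:
--             buf.insert(pos, ch)
--             pos += 1
--     return "".join(buf)
-- ===== Notes on version B (the rewrite author's own statement) =====
-- stated objective: simpler
-- what changed: Replaces the two-stack gap buffer (with redundant top counters and a two-phase stack-draining combine that builds the answer by repeated string concatenation) with a single buffer list and a clamped integer cursor, inserting at the cursor and joining once at the end.
import Mathlib
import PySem

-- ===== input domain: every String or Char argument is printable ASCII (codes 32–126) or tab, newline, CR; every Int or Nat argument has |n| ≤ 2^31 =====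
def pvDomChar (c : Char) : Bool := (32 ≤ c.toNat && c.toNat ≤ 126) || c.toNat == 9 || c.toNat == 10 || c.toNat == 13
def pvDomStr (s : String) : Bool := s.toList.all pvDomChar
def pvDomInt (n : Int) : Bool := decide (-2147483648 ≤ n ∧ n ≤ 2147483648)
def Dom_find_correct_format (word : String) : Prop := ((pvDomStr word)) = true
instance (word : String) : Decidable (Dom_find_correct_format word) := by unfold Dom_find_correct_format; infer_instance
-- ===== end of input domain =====

-- B replaces A's two-stack gap buffer with a single buffer list and a clamped integer cursor (simpler).

-- ===== PORT A =====
-- stacks are List Char with the head as the top (Python append/pop at the end = cons/head here);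
-- the answer string is accumulated as a List Char (answer += ch is acc ++ [ch]) and packed with String.mk at the end.

-- first while-loop of combine_and_get_answer: move top_first items from first_stack onto second_stack
def pvMoveAll : Nat → List Char → List Char → List Char
  | 0, _, second => second
  | _ + 1, [], second => second   -- unreachable when the counter equals the stack length
  | n + 1, c :: rest, second => pvMoveAll n rest (c :: second)

-- second while-loop: pop top_second items off second_stack, appending each to the answer
def pvPopAll : Nat → List Char → List Char → List Char
  | 0, _, acc => acc
  | _ + 1, [], acc => acc         -- unreachable when the counter equals the stack length
  | n + 1, c :: rest, acc => pvPopAll n rest (acc ++ [c])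

def combine_and_get_answer (first second : List Char) (topFirst topSecond : Nat) : String :=
  String.mk (pvPopAll (topSecond + topFirst) (pvMoveAll topFirst first second) [])

def pvStepA (st : List Char × List Char × Nat × Nat) (c : Char) : List Char × List Char × Nat × Nat :=
  let (first, second, tf, ts) := st
  if c = 'L' then
    if tf ≠ 0 then
      match first with
      | x :: rest => (rest, x :: second, tf - 1, ts + 1)
      | [] => (first, second, tf, ts)   -- unreachable (tf = first.length)
    else (first, second, tf, ts)
  else if c = 'R' then
    if ts ≠ 0 then
      match second with
      | x :: rest => (x :: first, rest, tf + 1, ts - 1)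
      | [] => (first, second, tf, ts)   -- unreachable (ts = second.length)
    else (first, second, tf, ts)
  else (c :: first, second, tf + 1, ts)

def find_correct_format (word : String) : String :=
  match word.toList.foldl pvStepA ([], [], 0, 0) with
  | (first, second, tf, ts) => combine_and_get_answer first second tf ts

-- ===== PORT B =====
def pvStepB (st : List Char × Int) (c : Char) : List Char × Int :=
  let (buf, pos) := st
  if c = 'L' then (buf, max (pos - 1) 0)
  else if c = 'R' then (buf, min (pos + 1) (buf.length : Int))
  else (PySem.List.insert buf pos c, pos + 1)

def find_correct_format_alt (word : String) : String :=
  String.mk (word.toList.foldl pvStepB ([], 0)).1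

-- ===== PRECONDITION & SPEC =====
def Spec_find_correct_format (word : String) (out : String) : Prop := out = find_correct_format_alt word
instance (word : String) (out : String) : Decidable (Spec_find_correct_format word out) := by unfold Spec_find_correct_format; infer_instance

-- ===== CLAIM (what is proved, stated in full; the proofs are below) =====
def Claim_equal_find_correct_format : Prop := ∀ (word : String), Dom_find_correct_format word → Spec_find_correct_format word (find_correct_format word)

-- ===== LEMMAS AND PROOFS =====

-- counter-free form of A's editing loop: the state is just (first_stack, second_stack)
def pvG (st : List Char × List Char) (c : Char) : List Char × List Char :=
  if c = 'L' then
    match st.1 with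
    | x :: rest => (rest, x :: st.2)
    | [] => st
  else if c = 'R' then
    match st.2 with
    | x :: rest => (x :: st.1, rest)
    | [] => st
  else (c :: st.1, st.2)

-- A's loop keeps the counters equal to the stack lengths and otherwise computes pvG
lemma loopA_eq_g (cs first second : List Char) :
    cs.foldl pvStepA (first, second, first.length, second.length) =
      ((cs.foldl pvG (first, second)).1, (cs.foldl pvG (first, second)).2,
       (cs.foldl pvG (first, second)).1.length, (cs.foldl pvG (first, second)).2.length) := by
  induction cs generalizing first second with
  | nil => simp [List.foldl]
  | cons c cs ih =>
    simp only [List.foldl]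
    by_cases hL : c = 'L'
    · cases first with
      | nil => simpa [pvStepA, pvG, hL] using ih [] second
      | cons x rest => simpa [pvStepA, pvG, hL] using ih rest (x :: second)
    · by_cases hR : c = 'R'
      · cases second with
        | nil => simpa [pvStepA, pvG, hL, hR] using ih first []
        | cons x rest => simpa [pvStepA, pvG, hL, hR] using ih (x :: first) rest
      · simpa [pvStepA, pvG, hL, hR] using ih (c :: first) second

-- B's loop simulates pvG: buf = first.reverse ++ second, pos = first.length
lemma loopB_eq_g (cs first second : List Char) :
    cs.foldl pvStepB (first.reverse ++ second, (first.length : Int)) =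
      ((cs.foldl pvG (first, second)).1.reverse ++ (cs.foldl pvG (first, second)).2,
       ((cs.foldl pvG (first, second)).1.length : Int)) := by
  induction cs generalizing first second with
  | nil => simp [List.foldl]
  | cons c cs ih =>
    simp only [List.foldl]
    by_cases hL : c = 'L'
    · cases first with
      | nil => simpa [pvStepB, pvG, hL] using ih [] second
      | cons x rest =>
        have h1 : max ((((x :: rest).length : Nat) : Int) - 1) 0 = (rest.length : Int) := by
          simp
        have h2 : (x :: rest).reverse ++ second = rest.reverse ++ (x :: second) := by simp
        simpa [pvStepB, pvG, hL, h1, h2] using ih rest (x :: second)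
    · by_cases hR : c = 'R'
      · cases second with
        | nil =>
          have h1 : min (((first.length : Nat) : Int) + 1)
              ((first.reverse ++ ([] : List Char)).length : Int) = (first.length : Int) := by
            simp
          simpa [pvStepB, pvG, hL, hR, h1] using ih first []
        | cons x rest =>
          have h1 : min (((first.length : Nat) : Int) + 1)
              ((first.reverse ++ (x :: rest)).length : Int) = ((x :: first).length : Int) := by
            simp
          have h2 : first.reverse ++ (x :: rest) = (x :: first).reverse ++ rest := by simp
          rw [h2] at h1
          simpa [pvStepB, pvG, hL, hR, h1, ← h2] using ih (x :: first) rest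
      · have hlen : first.length ≤ (first.reverse ++ second).length := by simp
        have h1 : PySem.List.insert (first.reverse ++ second) (first.length : Int) c =
            (c :: first).reverse ++ second := by
          rw [PySem.List.insert_natCast _ _ _ hlen]
          have e : first.length = first.reverse.length := by simp
          rw [e, List.take_left, List.drop_left]
          simp
        have hstep : pvStepB (first.reverse ++ second, (first.length : Int)) c =
            ((c :: first).reverse ++ second, ((c :: first).length : Int)) := by
          simp only [pvStepB, if_neg hL, if_neg hR]
          rw [h1]
          simp
        have hg : pvG (first, second) c = (c :: first, second) := by
          simp [pvG, hL, hR]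
        rw [hstep, hg]
        exact ih (c :: first) second

lemma moveAll_len (first second : List Char) :
    pvMoveAll first.length first second = first.reverse ++ second := by
  induction first generalizing second with
  | nil => simp [pvMoveAll]
  | cons x rest ih => simp [pvMoveAll, List.length, ih (x :: second)]

lemma popAll_ge_len (n : Nat) (second acc : List Char) (h : second.length ≤ n) :
    pvPopAll n second acc = acc ++ second := by
  induction second generalizing n acc with
  | nil => cases n <;> simp [pvPopAll]
  | cons x rest ih =>
    cases n with
    | zero => simp at h
    | succ m =>
      simp only [pvPopAll]
      rw [ih m (acc ++ [x]) (by simpa using h)]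
      simp

-- ===== VERDICT (by name: the statement is the Claim_ definition above) =====
theorem find_correct_format_spec : Claim_equal_find_correct_format := by
  intro word _
  show find_correct_format word = find_correct_format_alt word
  unfold find_correct_format find_correct_format_alt combine_and_get_answer
  have hA := loopA_eq_g word.toList [] []
  have hB := loopB_eq_g word.toList [] []
  simp only [List.length_nil, List.reverse_nil, List.nil_append, Nat.cast_zero] at hA hB
  rw [hA, hB]
  set F := (word.toList.foldl pvG ([], [])).1
  set S := (word.toList.foldl pvG ([], [])).2
  show combine_and_get_answer F S F.length S.length = String.mk (F.reverse ++ S)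
  unfold combine_and_get_answer
  rw [moveAll_len F S, popAll_ge_len (S.length + F.length) (F.reverse ++ S) [] (by simp [Nat.add_comm])]
  simp
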